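-- pv_equiv track=rewrite | github.com/FuyuLinh/KnapsackProblem | Local_Beam_search/Local_beam_search.py | find_max_heuristic_not_by_class
-- ===== SOURCE A (Python) =====
-- def find_max_heuristic_not_by_class(weight_list, value_list, class_list, heuristic_list, active_list, max_weight, total_weight, total_value):
--   temp_heuristic = []
--   temp_position = []
--   _max = 0
--   position = 0
--   check_full = False
--
--   for i in range(0, len(class_list)):
--     if active_list[i] != True and total_weight + weight_list[i] <= max_weight:
--       temp_heuristic.append(heuristic_list[i])
--       temp_position.append(i)
--
--   for i in range(0, len(temp_heuristic)):
--     if temp_heuristic[i] == max(temp_heuristic):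
--       _max = temp_heuristic[i]
--       position = temp_position[i]
--       total_weight += weight_list[position]
--       total_value += value_list[position]
--       break
--   if len(temp_heuristic) == 0:
--     check_full = True
--   return total_weight, position, check_full, total_value
-- ===== SOURCE B (Python) =====
-- def find_max_heuristic_not_by_class(weight_list, value_list, class_list, heuristic_list, active_list, max_weight, total_weight, total_value):
--     best = None
--     position = 0
--     for i in range(len(class_list)):
--         if active_list[i] != True and total_weight + weight_list[i] <= max_weight:
--             if best is None or heuristic_list[i] > best:
--                 best = heuristic_list[i]
--                 position = i
--     if best is None:
--         return total_weight, position, True, total_value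
--     return (total_weight + weight_list[position], position, False,
--             total_value + value_list[position])
-- ===== Notes on version B (the rewrite author's own statement) =====
-- stated objective: faster
-- what changed: Replaced A's build-filtered-temp-lists-then-rescan-with-max-recomputed-each-iteration by a single running-argmax scan over the indices (strict '>' keeps the first maximum), updating totals once at the end.
import Mathlib
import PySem

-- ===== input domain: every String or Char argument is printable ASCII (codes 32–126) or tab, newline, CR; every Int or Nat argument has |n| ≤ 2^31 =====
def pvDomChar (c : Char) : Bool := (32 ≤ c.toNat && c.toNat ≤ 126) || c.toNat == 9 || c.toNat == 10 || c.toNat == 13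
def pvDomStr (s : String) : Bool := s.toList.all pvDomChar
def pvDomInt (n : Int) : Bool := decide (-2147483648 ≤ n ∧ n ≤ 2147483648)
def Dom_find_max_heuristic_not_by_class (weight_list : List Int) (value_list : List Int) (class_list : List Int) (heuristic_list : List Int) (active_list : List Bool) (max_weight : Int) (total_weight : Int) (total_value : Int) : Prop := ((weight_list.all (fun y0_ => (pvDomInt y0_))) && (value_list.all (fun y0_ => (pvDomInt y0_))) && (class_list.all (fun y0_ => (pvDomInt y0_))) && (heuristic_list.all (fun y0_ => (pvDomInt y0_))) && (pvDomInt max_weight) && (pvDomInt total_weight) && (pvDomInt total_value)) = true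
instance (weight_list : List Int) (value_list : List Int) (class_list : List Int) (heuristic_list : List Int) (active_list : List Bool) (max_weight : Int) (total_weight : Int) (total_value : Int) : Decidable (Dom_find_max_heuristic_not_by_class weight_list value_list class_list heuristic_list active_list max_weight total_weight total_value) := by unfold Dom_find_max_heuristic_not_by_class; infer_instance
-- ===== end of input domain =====

-- B replaces A's filtered temp lists and quadratic rescan (max recomputed per iteration)
-- by a single running-argmax scan; objective: faster.

-- ===== PORT A =====
-- step of A's first loop: append eligible heuristics/positions to the two temp lists
def pvStepA (weight_list heuristic_list : List Int) (active_list : List Bool)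
    (max_weight total_weight : Int) (acc : List Int × List Int) (i : Nat) : List Int × List Int :=
  if active_list.getD i true ≠ true ∧ total_weight + weight_list.getD i 0 ≤ max_weight then
    (acc.1 ++ [heuristic_list.getD i 0], acc.2 ++ [(i : Int)])
  else acc

-- A's second loop: scan temp lists, break at the first entry equal to max(temp_heuristic)
-- (Python's max(...) is only evaluated while the loop runs, i.e. on a nonempty list)
def pvLoop2 (full_h : List Int) : List Int → List Int → Option Int
  | h :: hs, p :: ps =>
      if some h = PySem.List.max? full_h (fun y => y) then some p else pvLoop2 full_h hs ps
  | _, _ => none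

def find_max_heuristic_not_by_class (weight_list : List Int) (value_list : List Int) (class_list : List Int) (heuristic_list : List Int) (active_list : List Bool) (max_weight : Int) (total_weight : Int) (total_value : Int) : Int × Int × Bool × Int :=
  let tmp := (List.range class_list.length).foldl
    (pvStepA weight_list heuristic_list active_list max_weight total_weight) ([], [])
  match pvLoop2 tmp.1 tmp.1 tmp.2 with
  | some position =>
      (total_weight + weight_list.getD position.toNat 0, position,
       decide (tmp.1.length = 0), total_value + value_list.getD position.toNat 0)
  | none => (total_weight, 0, decide (tmp.1.length = 0), total_value)

-- ===== PORT B =====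
-- B's single pass: running best heuristic (Option) and its position
def pvStepB (weight_list heuristic_list : List Int) (active_list : List Bool)
    (max_weight total_weight : Int) (st : Option Int × Int) (i : Nat) : Option Int × Int :=
  if active_list.getD i true ≠ true ∧ total_weight + weight_list.getD i 0 ≤ max_weight then
    match st.1 with
    | none => (some (heuristic_list.getD i 0), (i : Int))
    | some b => if heuristic_list.getD i 0 > b then (some (heuristic_list.getD i 0), (i : Int)) else st
  else st

def find_max_heuristic_not_by_class_alt (weight_list : List Int) (value_list : List Int) (class_list : List Int) (heuristic_list : List Int) (active_list : List Bool) (max_weight : Int) (total_weight : Int) (total_value : Int) : Int × Int × Bool × Int :=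
  let st := (List.range class_list.length).foldl
    (pvStepB weight_list heuristic_list active_list max_weight total_weight) (none, 0)
  match st.1 with
  | none => (total_weight, st.2, true, total_value)
  | some _ =>
      (total_weight + weight_list.getD st.2.toNat 0, st.2, false,
       total_value + value_list.getD st.2.toNat 0)

-- ===== PRECONDITION & SPEC =====
-- Pre_ excludes exactly the inputs where an index A scans is out of range of one of the
-- parallel lists (Python IndexError), except that value_list is required to cover every
-- eligible index although A reads value_list only at the one selected position — a slight
-- stated narrowing (closed form cannot name the selected position without running A).
def Pre_find_max_heuristic_not_by_class (weight_list : List Int) (value_list : List Int) (class_list : List Int) (heuristic_list : List Int) (active_list : List Bool) (max_weight : Int) (total_weight : Int) (total_value : Int) : Prop :=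
  class_list.length ≤ active_list.length ∧
  ∀ i, i < class_list.length →
    active_list.getD i true ≠ true →
    i < weight_list.length ∧
      (total_weight + weight_list.getD i 0 ≤ max_weight →
        i < heuristic_list.length ∧ i < value_list.length)
instance (weight_list : List Int) (value_list : List Int) (class_list : List Int) (heuristic_list : List Int) (active_list : List Bool) (max_weight : Int) (total_weight : Int) (total_value : Int) : Decidable (Pre_find_max_heuristic_not_by_class weight_list value_list class_list heuristic_list active_list max_weight total_weight total_value) := by unfold Pre_find_max_heuristic_not_by_class; infer_instance

def pvWitness_find_max_heuristic_not_by_class : List Int × List Int × List Int × List Int × List Bool × Int × Int × Int :=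
  ([1, 2], [3, 4], [0, 0], [5, 7], [false, false], 10, 0, 0)

def Spec_find_max_heuristic_not_by_class (weight_list : List Int) (value_list : List Int) (class_list : List Int) (heuristic_list : List Int) (active_list : List Bool) (max_weight : Int) (total_weight : Int) (total_value : Int) (out : Int × Int × Bool × Int) : Prop := out = find_max_heuristic_not_by_class_alt weight_list value_list class_list heuristic_list active_list max_weight total_weight total_value
instance (weight_list : List Int) (value_list : List Int) (class_list : List Int) (heuristic_list : List Int) (active_list : List Bool) (max_weight : Int) (total_weight : Int) (total_value : Int) (out : Int × Int × Bool × Int) : Decidable (Spec_find_max_heuristic_not_by_class weight_list value_list class_list heuristic_list active_list max_weight total_weight total_value out) := by unfold Spec_find_max_heuristic_not_by_class; infer_instance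

-- ===== CLAIM (what is proved, stated in full; the proofs are below) =====
def Claim_equal_find_max_heuristic_not_by_class : Prop := ∀ (weight_list : List Int) (value_list : List Int) (class_list : List Int) (heuristic_list : List Int) (active_list : List Bool) (max_weight : Int) (total_weight : Int) (total_value : Int), Dom_find_max_heuristic_not_by_class weight_list value_list class_list heuristic_list active_list max_weight total_weight total_value → Pre_find_max_heuristic_not_by_class weight_list value_list class_list heuristic_list active_list max_weight total_weight total_value → Spec_find_max_heuristic_not_by_class weight_list value_list class_list heuristic_list active_list max_weight total_weight total_value (find_max_heuristic_not_by_class weight_list value_list class_list heuristic_list active_list max_weight total_weight total_value)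

-- ===== LEMMAS AND PROOFS =====

-- the list of (heuristic, position) pairs of the eligible indices, in order
def pvPairs (weight_list heuristic_list : List Int) (active_list : List Bool)
    (max_weight total_weight : Int) (l : List Nat) : List (Int × Int) :=
  l.filterMap (fun i =>
    if active_list.getD i true ≠ true ∧ total_weight + weight_list.getD i 0 ≤ max_weight then
      some (heuristic_list.getD i 0, (i : Int))
    else none)

-- first pair with maximal first component, earliest on ties
def pvPick1 (x : Int × Int) : List (Int × Int) → Int × Int
  | [] => x
  | y :: L => if x.1 ≥ (pvPick1 y L).1 then x else pvPick1 y L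

def pvPick : List (Int × Int) → Option (Int × Int)
  | [] => none
  | x :: L => some (pvPick1 x L)

def pvEnc : Option (Int × Int) → Option Int × Int
  | none => (none, 0)
  | some y => (some y.1, y.2)

theorem pvPick1_mem (x : Int × Int) (L : List (Int × Int)) : pvPick1 x L ∈ x :: L := by
  induction L generalizing x with
  | nil => simp [pvPick1]
  | cons y L ih =>
    simp only [pvPick1]
    split
    · exact List.mem_cons_self
    · exact List.mem_cons_of_mem _ (ih y)

theorem pvPick1_isMax (x : Int × Int) (L : List (Int × Int)) :
    ∀ z ∈ x :: L, z.1 ≤ (pvPick1 x L).1 := by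
  induction L generalizing x with
  | nil => simp [pvPick1]
  | cons y L ih =>
    intro z hz
    simp only [pvPick1]
    rcases List.mem_cons.mp hz with rfl | hz
    · split <;> omega
    · have := ih y z hz
      split <;> omega

theorem pvPick1_append (x z : Int × Int) (L : List (Int × Int)) :
    pvPick1 x (L ++ [z]) = if z.1 > (pvPick1 x L).1 then z else pvPick1 x L := by
  induction L generalizing x with
  | nil =>
    simp only [List.nil_append, pvPick1]
    split_ifs <;> first | rfl | omega
  | cons y L ih =>
    simp only [List.cons_append, pvPick1, ih y]
    split_ifs <;> first | rfl | omega

theorem pvFoldA_eq (weight_list heuristic_list : List Int) (active_list : List Bool)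
    (max_weight total_weight : Int) :
    ∀ (l : List Nat) (acc : List Int × List Int),
      l.foldl (pvStepA weight_list heuristic_list active_list max_weight total_weight) acc =
        (acc.1 ++ (pvPairs weight_list heuristic_list active_list max_weight total_weight l).map Prod.fst,
         acc.2 ++ (pvPairs weight_list heuristic_list active_list max_weight total_weight l).map Prod.snd) := by
  intro l
  induction l with
  | nil => intro acc; simp [pvPairs]
  | cons i l ih =>
    intro acc
    simp only [List.foldl_cons, ih, pvStepA, pvPairs, List.filterMap_cons]
    split <;> simp

theorem pvFoldB_eq (weight_list heuristic_list : List Int) (active_list : List Bool)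
    (max_weight total_weight : Int) :
    ∀ (l : List Nat) (M : List (Int × Int)),
      l.foldl (pvStepB weight_list heuristic_list active_list max_weight total_weight) (pvEnc (pvPick M)) =
        pvEnc (pvPick (M ++ pvPairs weight_list heuristic_list active_list max_weight total_weight l)) := by
  intro l
  induction l with
  | nil => intro M; simp [pvPairs]
  | cons i l ih =>
    intro M
    simp only [List.foldl_cons]
    by_cases hc : active_list.getD i true ≠ true ∧ total_weight + weight_list.getD i 0 ≤ max_weight
    · have hstep : pvStepB weight_list heuristic_list active_list max_weight total_weight
          (pvEnc (pvPick M)) i =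
          pvEnc (pvPick (M ++ [(heuristic_list.getD i 0, (i : Int))])) := by
        cases M with
        | nil =>
          simp only [List.nil_append, pvStepB, if_pos hc, pvPick, pvPick1, pvEnc]
        | cons y M =>
          simp only [pvPick, pvEnc, pvStepB, if_pos hc, List.cons_append, pvPick1_append]
          by_cases hgt : heuristic_list.getD i 0 > (pvPick1 y M).1
          · simp only [if_pos hgt]
          · simp only [if_neg hgt]
      have hPairs : pvPairs weight_list heuristic_list active_list max_weight total_weight (i :: l) =
          (heuristic_list.getD i 0, (i : Int)) ::
            pvPairs weight_list heuristic_list active_list max_weight total_weight l := by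
        simp only [pvPairs, List.filterMap_cons, if_pos hc]
      rw [hstep, ih, hPairs, List.append_assoc, List.singleton_append]
    · have hstep : pvStepB weight_list heuristic_list active_list max_weight total_weight
          (pvEnc (pvPick M)) i = pvEnc (pvPick M) := by
        simp only [pvStepB, if_neg hc]
      have hPairs : pvPairs weight_list heuristic_list active_list max_weight total_weight (i :: l) =
          pvPairs weight_list heuristic_list active_list max_weight total_weight l := by
        simp only [pvPairs, List.filterMap_cons, if_neg hc]
      rw [hstep, ih, hPairs]

theorem pvLoop2_eq (full : List Int) :
    ∀ L : List (Int × Int),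
      pvLoop2 full (L.map Prod.fst) (L.map Prod.snd) =
        (L.find? (fun z => decide (some z.1 = PySem.List.max? full (fun y => y)))).map Prod.snd := by
  intro L
  induction L with
  | nil => simp [pvLoop2]
  | cons x M ih =>
    simp only [List.map_cons, pvLoop2, List.find?_cons]
    by_cases hc : some x.1 = PySem.List.max? full (fun y => y)
    · simp [hc]
    · simp [hc, ih]

theorem pvFind_eq_pick1 (m : Int) :
    ∀ (L : List (Int × Int)) (x : Int × Int),
      (∀ z ∈ x :: L, z.1 ≤ m) → (∃ z ∈ x :: L, z.1 = m) →
      (x :: L).find? (fun z => decide (z.1 = m)) = some (pvPick1 x L) := by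
  intro L
  induction L with
  | nil =>
    intro x _ hex
    have hx : x.1 = m := by
      rcases hex with ⟨z, hz, hzm⟩; simp at hz; subst hz; exact hzm
    simp [List.find?_cons, hx, pvPick1]
  | cons y L ih =>
    intro x hub hex
    by_cases hx : x.1 = m
    · have hle : (pvPick1 y L).1 ≤ m := hub _ (List.mem_cons_of_mem _ (pvPick1_mem y L))
      have hge : x.1 ≥ (pvPick1 y L).1 := by omega
      rw [List.find?_cons_of_pos (by simp [hx])]
      simp only [pvPick1, if_pos hge]
    · have hxle : x.1 ≤ m := hub x List.mem_cons_self
      have hexM : ∃ z ∈ y :: L, z.1 = m := by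
        rcases hex with ⟨z, hz, hzm⟩
        rcases List.mem_cons.mp hz with rfl | h
        · exact absurd hzm hx
        · exact ⟨z, h, hzm⟩
      have hubM : ∀ z ∈ y :: L, z.1 ≤ m := fun z hz => hub z (List.mem_cons_of_mem _ hz)
      have hpm : m ≤ (pvPick1 y L).1 := by
        rcases hexM with ⟨z, hz, hzm⟩
        have := pvPick1_isMax y L z hz
        omega
      have hlt : ¬ x.1 ≥ (pvPick1 y L).1 := by omega
      rw [List.find?_cons_of_neg (by simp [hx]), ih y hubM hexM]
      simp [pvPick1, hlt]

-- ===== VERDICT (by name: the statement is the Claim_ definition above) =====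
theorem find_max_heuristic_not_by_class_spec : Claim_equal_find_max_heuristic_not_by_class := by
  intro weight_list value_list class_list heuristic_list active_list max_weight total_weight total_value _ _
  unfold Spec_find_max_heuristic_not_by_class
  show find_max_heuristic_not_by_class weight_list value_list class_list heuristic_list active_list
      max_weight total_weight total_value = _
  unfold find_max_heuristic_not_by_class find_max_heuristic_not_by_class_alt
  rw [pvFoldA_eq]
  have hB := pvFoldB_eq weight_list heuristic_list active_list max_weight total_weight
      (List.range class_list.length) []
  simp only [show pvEnc (pvPick []) = ((none, 0) : Option Int × Int) from rfl,
    List.nil_append] at hB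
  rw [hB]
  simp only [List.nil_append]
  cases hcase : pvPairs weight_list heuristic_list active_list max_weight total_weight
      (List.range class_list.length) with
  | nil => simp [pvLoop2, pvPick, pvEnc]
  | cons x M =>
    have hne : ((x :: M).map Prod.fst) ≠ [] := by simp
    obtain ⟨m, hm⟩ : ∃ m, PySem.List.max? ((x :: M).map Prod.fst) (fun y => y) = some m := by
      cases h : PySem.List.max? ((x :: M).map Prod.fst) (fun y => y) with
      | none => exact absurd ((PySem.List.max?_eq_none_iff _ _).mp h) hne
      | some m => exact ⟨m, rfl⟩
    have hub : ∀ z ∈ x :: M, z.1 ≤ m := fun z hz =>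
      PySem.List.max?_isMax hm z.1 (List.mem_map_of_mem hz)
    have hexm : ∃ z ∈ x :: M, z.1 = m := by
      rcases List.mem_map.mp (PySem.List.max?_mem hm) with ⟨z, hz, hzm⟩
      exact ⟨z, hz, hzm⟩
    rw [pvLoop2_eq ((x :: M).map Prod.fst) (x :: M), hm]
    have hpred : (fun z : Int × Int => decide (some z.1 = some m)) =
        (fun z : Int × Int => decide (z.1 = m)) := by
      funext z; simp
    rw [hpred, pvFind_eq_pick1 m M x hub hexm]
    simp [pvPick, pvEnc]
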